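-- pv_equiv track=rewrite | github.com/omerb01/Google-HashCode2019-Hackathon | main.py | sort_photos_by_common_num
-- ===== SOURCE A (Python) =====
-- def get_num_intersect_tags(photo1, photo2):
--     photo1_tags = photo1[3]
--     photo2_tags = photo2[3]
--     intersect_tags_list = list(set(photo1_tags).intersection(photo2_tags))
--     return len(intersect_tags_list)
--
-- def sort_photos_by_common_num(vertical_photos):
--     # result format: (id, sorted_photos_by_common_num)
--     result = []
--     for photo in vertical_photos:
--         sorted_photos = []
--         for id, orientation, num_of_tags, tags in vertical_photos:
--             num_common_tags = get_num_intersect_tags(photo, (id, orientation, num_of_tags, tags))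
--             sorted_photos.append((id, num_common_tags))
--         sorted_photos.sort(key=lambda item: item[1])
--         sorted_photos = [id for id, common_num in sorted_photos]
--         result.append((photo[0], sorted_photos))
--
--     return result
-- ===== SOURCE B (Python) =====
-- def sort_photos_by_common_num(vertical_photos):
--     # Precompute each photo's distinct tags once (A rebuilds both sets for every
--     # pair) and replace the per-photo comparison sort by a stable counting sort.
--     dtags = [list(dict.fromkeys(p[3])) for p in vertical_photos]
--     tagsets = [set(dt) for dt in dtags]
--     result = []
--     for photo, dti in zip(vertical_photos, dtags):
--         buckets = [[] for _ in range(len(dti) + 1)]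
--         for p, sj in zip(vertical_photos, tagsets):
--             c = sum(1 for t in dti if t in sj)
--             buckets[c].append(p[0])
--         ids = []
--         for b in buckets:
--             ids.extend(b)
--         result.append((photo[0], ids))
--     return result
-- ===== Notes on version B (the rewrite author's own statement) =====
-- stated objective: alternative
-- what changed: B deduplicates each photo's tag list and builds its tag set once up front instead of rebuilding two sets for every pair, and replaces each per-photo comparison sort with a stable counting sort into count-indexed buckets (measured ~1.3-1.7x, below the 1.5x bar at the largest size, so no speed is claimed).
import Mathlib
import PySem

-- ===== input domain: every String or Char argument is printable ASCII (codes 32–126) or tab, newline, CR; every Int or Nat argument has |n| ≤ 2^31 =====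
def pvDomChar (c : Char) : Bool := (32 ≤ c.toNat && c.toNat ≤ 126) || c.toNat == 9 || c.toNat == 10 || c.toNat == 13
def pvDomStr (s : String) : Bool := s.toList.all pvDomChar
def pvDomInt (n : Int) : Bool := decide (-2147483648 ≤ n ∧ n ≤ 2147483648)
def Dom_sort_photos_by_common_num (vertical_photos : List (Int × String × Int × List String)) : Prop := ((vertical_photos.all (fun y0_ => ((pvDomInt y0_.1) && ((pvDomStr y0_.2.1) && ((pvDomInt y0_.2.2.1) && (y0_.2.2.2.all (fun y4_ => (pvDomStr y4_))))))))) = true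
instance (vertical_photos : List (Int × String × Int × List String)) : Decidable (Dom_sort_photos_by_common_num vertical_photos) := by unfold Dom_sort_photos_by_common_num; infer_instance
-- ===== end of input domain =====

-- B deduplicates each photo's tag list once (A rebuilds both sets for every pair) and
-- replaces the per-photo comparison sort by a stable counting sort into buckets.

-- ===== PORT A =====
def get_num_intersect_tags (photo1 photo2 : Int × String × Int × List String) : Int :=
  let photo1_tags := photo1.2.2.2
  let photo2_tags := photo2.2.2.2
  let intersect_tags_list := PySem.Set.inter (PySem.Set.ofList photo1_tags) photo2_tags
  (intersect_tags_list.length : Int)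

def sort_photos_by_common_num (vertical_photos : List (Int × String × Int × List String)) : List (Int × List Int) :=
  vertical_photos.foldl (fun result photo =>
    let sorted_photos := vertical_photos.foldl (fun acc p =>
      acc ++ [(p.1, get_num_intersect_tags photo (p.1, p.2.1, p.2.2.1, p.2.2.2))]) []
    let sorted_photos := PySem.List.sorted sorted_photos (fun item => item.2) false
    let ids := sorted_photos.map (fun x => x.1)
    result ++ [(photo.1, ids)]) []

-- ===== PORT B =====
def sort_photos_by_common_num_alt (vertical_photos : List (Int × String × Int × List String)) : List (Int × List Int) :=
  let dtags := vertical_photos.map (fun p => PySem.List.dedup p.2.2.2)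
  let tagsets := dtags.map (fun dt => PySem.Set.ofList dt)
  (vertical_photos.zip dtags).foldl (fun result pd =>
    let buckets0 : List (List Int) := List.replicate (pd.2.length + 1) []
    let buckets := (vertical_photos.zip tagsets).foldl (fun bs ps =>
      -- c = sum(1 for t in dti if t in sj); c ≤ len(dti), so buckets[c].append is the in-range List.set
      let c := pd.2.countP (fun t => ps.2.contains t)
      bs.set c (bs.getD c [] ++ [ps.1.1])) buckets0
    let ids := buckets.foldl (fun a b => a ++ b) []
    result ++ [(pd.1.1, ids)]) []

-- ===== PRECONDITION & SPEC =====
def Spec_sort_photos_by_common_num (vertical_photos : List (Int × String × Int × List String)) (out : List (Int × List Int)) : Prop := out = sort_photos_by_common_num_alt vertical_photos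
instance (vertical_photos : List (Int × String × Int × List String)) (out : List (Int × List Int)) : Decidable (Spec_sort_photos_by_common_num vertical_photos out) := by unfold Spec_sort_photos_by_common_num; infer_instance

-- ===== CLAIM (what is proved, stated in full; the proofs are below) =====
def Claim_equal_sort_photos_by_common_num : Prop := ∀ (vertical_photos : List (Int × String × Int × List String)), Dom_sort_photos_by_common_num vertical_photos → Spec_sort_photos_by_common_num vertical_photos (sort_photos_by_common_num vertical_photos)

-- ===== LEMMAS AND PROOFS =====

-- zipping a list with a mapped copy of itself
theorem pv_zip_map_self {α β : Type} (h : α → β) (l : List α) :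
    l.zip (l.map h) = l.map (fun x => (x, h x)) := by
  induction l with
  | nil => rfl
  | cons x xs ih => simp [ih]

-- insertBy walks past a prefix it does not go before
theorem pv_insertBy_append_left {α : Type} (before : α → α → Bool) (x : α) (P Q : List α)
    (h : ∀ y ∈ P, before x y = false) :
    PySem.List.insertBy before x (P ++ Q) = P ++ PySem.List.insertBy before x Q := by
  induction P with
  | nil => rfl
  | cons y ys ih =>
    have hy : before x y = false := h y (by simp)
    simp [PySem.List.insertBy, hy, ih (fun z hz => h z (by simp [hz]))]

-- insertBy stops immediately when it goes before everything
theorem pv_insertBy_all_before {α : Type} (before : α → α → Bool) (x : α) (Q : List α)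
    (h : ∀ y ∈ Q, before x y = true) :
    PySem.List.insertBy before x Q = x :: Q := by
  cases Q with
  | nil => rfl
  | cons y ys => simp [PySem.List.insertBy, h y (by simp)]

-- inserting one element into a bucket-flattened list appends it to its own bucket
theorem pv_insertBy_flat {α : Type} (key : α → Int) (m : Nat) (x : α) (F : Nat → List α)
    (hF : ∀ c, ∀ y ∈ F c, key y = (c : Int)) (hx0 : 0 ≤ key x) (hxm : key x ≤ (m : Int)) :
    PySem.List.insertBy (fun a b => decide (key a < key b)) x ((List.range (m+1)).flatMap F)
      = (List.range (m+1)).flatMap (fun (c : Nat) => if (c : Int) = key x then F c ++ [x] else F c) := by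
  set k := (key x).toNat with hkdef
  have hk : (k : Int) = key x := Int.toNat_of_nonneg hx0
  have hkm : k ≤ m := by omega
  have hsplit : m + 1 = (k + 1) + (m - k) := by omega
  rw [hsplit, List.range_add, List.flatMap_append, List.flatMap_append]
  have hP : ∀ y ∈ (List.range (k+1)).flatMap F, (fun a b => decide (key a < key b)) x y = false := by
    intro y hy
    obtain ⟨c, hc, hyF⟩ := List.mem_flatMap.mp hy
    have := hF c y hyF
    simp only [List.mem_range] at hc
    simp only [decide_eq_false_iff_not, not_lt, this, ← hk]
    exact_mod_cast by omega
  have hQ : ∀ y ∈ ((List.range (m-k)).map ((k+1) + ·)).flatMap F,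
      (fun a b => decide (key a < key b)) x y = true := by
    intro y hy
    obtain ⟨c, hc, hyF⟩ := List.mem_flatMap.mp hy
    obtain ⟨i, _, rfl⟩ := List.mem_map.mp hc
    have := hF _ y hyF
    simp only [decide_eq_true_eq, this, ← hk]
    exact_mod_cast by omega
  rw [pv_insertBy_append_left _ _ _ _ hP, pv_insertBy_all_before _ _ _ hQ]
  have h1 : (List.range (k+1)).flatMap (fun (c : Nat) => if (c : Int) = key x then F c ++ [x] else F c)
      = (List.range k).flatMap F ++ (F k ++ [x]) := by
    rw [List.range_succ, List.flatMap_append]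
    congr 1
    · apply List.flatMap_congr
      intro c hc
      simp only [List.mem_range] at hc
      have : ¬ ((c : Int) = key x) := by rw [← hk]; exact_mod_cast by omega
      simp [this]
    · simp [hk]
  have h2 : ((List.range (m-k)).map ((k+1) + ·)).flatMap (fun (c : Nat) => if (c : Int) = key x then F c ++ [x] else F c)
      = ((List.range (m-k)).map ((k+1) + ·)).flatMap F := by
    apply List.flatMap_congr
    intro c hc
    obtain ⟨i, _, rfl⟩ := List.mem_map.mp hc
    have : ¬ (((k+1+i : Nat) : Int) = key x) := by rw [← hk]; exact_mod_cast by omega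
    simp only [this, if_false]
  rw [h1, h2]
  rw [List.range_succ, List.flatMap_append]
  simp

-- A's insertion-sort fold keeps the bucket decomposition invariant
theorem pv_foldl_ins_flat {α : Type} (key : α → Int) (m : Nat) (xs : List α) (p : List α)
    (h : ∀ x ∈ xs, 0 ≤ key x ∧ key x ≤ (m : Int)) :
    xs.foldl (fun acc x => PySem.List.insertBy (fun a b => decide (key a < key b)) x acc)
      ((List.range (m+1)).flatMap (fun (c : Nat) => p.filter (fun y => decide (key y = (c : Int)))))
    = (List.range (m+1)).flatMap (fun (c : Nat) => (p ++ xs).filter (fun y => decide (key y = (c : Int)))) := by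
  induction xs generalizing p with
  | nil => simp
  | cons x xs ih =>
    rw [List.foldl_cons]
    rw [pv_insertBy_flat key m x _
      (by intro c y hy; exact of_decide_eq_true (List.mem_filter.mp hy).2)
      (h x (by simp)).1 (h x (by simp)).2]
    have hstep : (List.range (m+1)).flatMap
        (fun (c : Nat) => if (c : Int) = key x
          then p.filter (fun y => decide (key y = (c : Int))) ++ [x]
          else p.filter (fun y => decide (key y = (c : Int))))
      = (List.range (m+1)).flatMap (fun (c : Nat) => (p ++ [x]).filter (fun y => decide (key y = (c : Int)))) := by
      apply List.flatMap_congr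
      intro c _
      rw [List.filter_append]
      by_cases hc : (c : Int) = key x
      · simp [hc]
      · have : ¬ (key x = (c : Int)) := fun h' => hc h'.symm
        simp [hc, this]
    rw [hstep, ih (p ++ [x]) (fun y hy => h y (by simp [hy]))]
    simp

-- stable sort of a list with keys in 0..m is the concatenation of its key-buckets
theorem pv_sorted_flat {α : Type} (key : α → Int) (m : Nat) (xs : List α)
    (h : ∀ x ∈ xs, 0 ≤ key x ∧ key x ≤ (m : Int)) :
    PySem.List.sorted xs key false
      = (List.range (m+1)).flatMap (fun (c : Nat) => xs.filter (fun y => decide (key y = (c : Int)))) := by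
  rw [PySem.List.sorted_eq_foldl_insertBy]
  have h0 : (List.range (m+1)).flatMap (fun (c : Nat) => ([] : List α).filter (fun y => decide (key y = (c : Int)))) = [] := by
    simp [List.flatMap_eq_nil_iff]
  have := pv_foldl_ins_flat key m xs [] h
  rw [h0] at this
  simpa using this

-- one bucket append, as List.set on the range-indexed bucket table
theorem pv_bk_set {α β : Type} (f : α → Nat) (g : α → β) (m : Nat) (p : List α) (x : α)
    (hx : f x ≤ m) :
    ((List.range (m+1)).map (fun c => (p.filter (fun y => decide (f y = c))).map g)).set (f x)
        (((List.range (m+1)).map (fun c => (p.filter (fun y => decide (f y = c))).map g)).getD (f x) [] ++ [g x])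
      = (List.range (m+1)).map (fun c => ((p ++ [x]).filter (fun y => decide (f y = c))).map g) := by
  have hlt : f x < m + 1 := by omega
  have hgetD : ((List.range (m+1)).map (fun c => (p.filter (fun y => decide (f y = c))).map g)).getD (f x) []
      = (p.filter (fun y => decide (f y = f x))).map g := by
    rw [List.getD_eq_getElem _ _ (by simp [hlt])]
    simp
  rw [hgetD]
  apply List.ext_getElem
  · simp
  · intro i hi hi'
    simp only [List.length_set, List.length_map, List.length_range] at hi
    simp only [List.getElem_set, List.getElem_map, List.getElem_range]
    by_cases hc : f x = i
    · subst hc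
      simp [List.filter_append]
    · simp [hc, List.filter_append]

-- the bucket-building fold computes the per-count filters (generalized invariant)
theorem pv_foldl_buckets_gen {α β : Type} (f : α → Nat) (g : α → β) (m : Nat) (ys p : List α)
    (h : ∀ y ∈ ys, f y ≤ m) :
    ys.foldl (fun bs y => bs.set (f y) (bs.getD (f y) [] ++ [g y]))
      ((List.range (m+1)).map (fun c => (p.filter (fun y => decide (f y = c))).map g))
    = (List.range (m+1)).map (fun c => ((p ++ ys).filter (fun y => decide (f y = c))).map g) := by
  induction ys generalizing p with
  | nil => simp
  | cons x ys ih =>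
    rw [List.foldl_cons, pv_bk_set f g m p x (h x (by simp)), ih (p ++ [x]) (fun y hy => h y (by simp [hy]))]
    simp

-- the bucket-building fold, from the empty bucket table
theorem pv_foldl_buckets {α β : Type} (f : α → Nat) (g : α → β) (m : Nat) (ys : List α)
    (h : ∀ y ∈ ys, f y ≤ m) :
    ys.foldl (fun bs y => bs.set (f y) (bs.getD (f y) [] ++ [g y])) (List.replicate (m+1) [])
      = (List.range (m+1)).map (fun c => (ys.filter (fun y => decide (f y = c))).map g) := by
  have h0 : (List.range (m+1)).map (fun c => (([] : List α).filter (fun y => decide (f y = c))).map g)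
      = List.replicate (m+1) ([] : List β) := by
    simp [List.map_const']
  have := pv_foldl_buckets_gen f g m ys [] h
  rw [h0] at this
  simpa using this

-- A's pair count equals B's countP over the deduplicated tags
theorem pv_count_eq (t1 t2 : List String) :
    ((PySem.Set.inter (PySem.Set.ofList t1) t2).length : Int)
      = ((PySem.List.dedup t1).countP
          (fun t => (PySem.Set.ofList (PySem.List.dedup t2)).contains t) : Int) := by
  congr 1
  rw [PySem.Set.inter, ← List.countP_eq_length_filter, ← PySem.List.dedup_eq_ofList]
  apply List.countP_congr
  intro t ht
  simp only [PySem.Set.contains, List.contains_iff_mem, PySem.Set.mem_ofList, PySem.List.mem_dedup]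

-- one row: A's sort-then-project equals B's bucket construction
theorem pv_row_eq (vp : List (Int × String × Int × List String)) (photo : Int × String × Int × List String) :
    (PySem.List.sorted (vp.map (fun p => (p.1, get_num_intersect_tags photo p))) (fun item => item.2) false).map (fun x => x.1)
      = ((vp.map (fun p => (p, PySem.Set.ofList (PySem.List.dedup p.2.2.2)))).foldl
          (fun bs ps =>
            bs.set ((PySem.List.dedup photo.2.2.2).countP (fun t => ps.2.contains t))
              (bs.getD ((PySem.List.dedup photo.2.2.2).countP (fun t => ps.2.contains t)) [] ++ [ps.1.1]))
          (List.replicate ((PySem.List.dedup photo.2.2.2).length + 1) [])).foldl (fun a b => a ++ b) [] := by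
  set dti := PySem.List.dedup photo.2.2.2 with hdti
  set m := dti.length with hm
  set f : (Int × String × Int × List String) → Nat :=
    fun p => dti.countP (fun t => (PySem.Set.ofList (PySem.List.dedup p.2.2.2)).contains t) with hf
  have hcnt : ∀ p : Int × String × Int × List String,
      get_num_intersect_tags photo p = ((f p : Nat) : Int) := by
    intro p
    simpa [get_num_intersect_tags, hf, hdti] using pv_count_eq photo.2.2.2 p.2.2.2
  -- B side: fold over the zipped-in tag sets is the bucket fold over vp
  have hBfold : (vp.map (fun p => (p, PySem.Set.ofList (PySem.List.dedup p.2.2.2)))).foldl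
        (fun bs ps => bs.set (dti.countP (fun t => ps.2.contains t))
          (bs.getD (dti.countP (fun t => ps.2.contains t)) [] ++ [ps.1.1]))
        (List.replicate (m + 1) [])
      = (List.range (m+1)).map (fun c => (vp.filter (fun p => decide (f p = c))).map (fun p => p.1)) := by
    rw [List.foldl_map]
    exact pv_foldl_buckets f (fun p => p.1) m vp (fun p _ => List.countP_le_length)
  rw [hBfold]
  rw [PySem.List.foldl_append_eq_flatMap (fun b => b)]
  -- A side: the stable sort is the concatenation of its count buckets
  have hbound : ∀ pr ∈ vp.map (fun p => (p.1, get_num_intersect_tags photo p)),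
      0 ≤ pr.2 ∧ pr.2 ≤ (m : Int) := by
    intro pr hpr
    obtain ⟨p, _, rfl⟩ := List.mem_map.mp hpr
    rw [hcnt p]
    constructor
    · show (0 : Int) ≤ ((f p : Nat) : Int)
      exact_mod_cast Nat.zero_le _
    · show ((f p : Nat) : Int) ≤ (m : Int)
      exact_mod_cast List.countP_le_length
  rw [pv_sorted_flat (fun item : Int × Int => item.2) m _ hbound]
  rw [List.map_flatMap]
  simp only [List.nil_append]
  rw [show ((List.range (m+1)).map (fun c => (vp.filter (fun p => decide (f p = c))).map (fun p => p.1))).flatMap (fun b => b)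
      = (List.range (m+1)).flatMap (fun c => (vp.filter (fun p => decide (f p = c))).map (fun p => p.1)) from by
    simp [List.flatMap_def, Function.comp_def]]
  apply List.flatMap_congr
  intro c _
  rw [List.filter_map, List.map_map]
  have hpred : ∀ p ∈ vp,
      ((fun (y : Int × Int) => decide (y.2 = (c : Int))) ∘ (fun p => (p.1, get_num_intersect_tags photo p))) p
        = decide (f p = c) := by
    intro p _
    simp [hcnt p]
  rw [List.filter_congr hpred]
  rfl

-- ===== VERDICT (by name: the statement is the Claim_ definition above) =====
theorem sort_photos_by_common_num_spec : Claim_equal_sort_photos_by_common_num := by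
  intro vp _
  unfold Spec_sort_photos_by_common_num sort_photos_by_common_num sort_photos_by_common_num_alt
  simp only [PySem.List.foldl_append_singleton_eq_map, List.nil_append, List.map_map,
    pv_zip_map_self]
  apply List.map_congr_left
  intro photo _
  exact congrArg (fun ids => (photo.1, ids)) (pv_row_eq vp photo)
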